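-- pv_equiv track=rewrite | github.com/thunlp/Sememe-SC | utils.py | preprocess_build_word_sememe_cooccur
-- ===== SOURCE A (Python) =====
-- def preprocess_build_word_sememe_cooccur(hownet_dict):
--     # 根据已有的hownet的词语到义原的dict，建立义原到词语的dict
--     sememe_all = list()
--     for word, sememes in hownet_dict.items():
--         for sememe in sememes:
--             if sememe not in sememe_all:
--                 sememe_all.append(sememe)
--     sememe_dict = {item: [] for item in sememe_all}
--     for word, sememes in hownet_dict.items():
--         for sememe in sememes:
--             sememe_dict[sememe].append(word)
--     return sememe_dict, sememe_all
-- ===== SOURCE B (Python) =====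
-- def preprocess_build_word_sememe_cooccur(hownet_dict):
--     # Gather formulation: dedup the flattened sememe stream once, then build
--     # each sememe's word list by a per-sememe comprehension over the corpus.
--     sememe_all = list(dict.fromkeys(s for ss in hownet_dict.values() for s in ss))
--     sememe_dict = {s: [w for w, ss in hownet_dict.items() for t in ss if t == s]
--                    for s in sememe_all}
--     return sememe_dict, sememe_all
-- ===== Notes on version B (the rewrite author's own statement) =====
-- stated objective: alternative
-- what changed: Instead of A's scatter (pre-seed a dict with empty lists, then replay all pairs appending each word into the dict), B deduplicates the flattened sememe stream once with dict.fromkeys and then GATHERS each sememe's word list by a per-sememe comprehension that filters the corpus; no dict is mutated.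
import Mathlib
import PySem

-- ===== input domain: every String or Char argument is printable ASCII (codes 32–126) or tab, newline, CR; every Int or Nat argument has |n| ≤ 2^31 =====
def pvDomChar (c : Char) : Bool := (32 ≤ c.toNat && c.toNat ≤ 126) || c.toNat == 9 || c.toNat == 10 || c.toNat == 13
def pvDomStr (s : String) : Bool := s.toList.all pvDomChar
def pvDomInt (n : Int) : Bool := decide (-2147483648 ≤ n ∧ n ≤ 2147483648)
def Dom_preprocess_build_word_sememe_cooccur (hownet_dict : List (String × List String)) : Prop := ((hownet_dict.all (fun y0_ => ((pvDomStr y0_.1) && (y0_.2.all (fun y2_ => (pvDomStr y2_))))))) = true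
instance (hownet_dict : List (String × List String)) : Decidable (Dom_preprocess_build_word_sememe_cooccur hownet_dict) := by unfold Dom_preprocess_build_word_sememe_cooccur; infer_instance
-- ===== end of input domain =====

-- B replaces A's scatter (pre-seed a dict with empty lists, then replay all (word, sememe)
-- pairs appending into it) by a gather: dedup the flattened sememe stream once, then build
-- each sememe's word list by filtering the corpus per sememe (alternative decomposition).

-- ===== PORT A =====
-- sememe_dict[sememe].append(word): modify the value at the first matching key
-- (in A every looked-up key is present by construction, so the [] case is unreachable; exact there).
def pvDmod : List (String × List String) → String → String → List (String × List String)
  | [], _, _ => []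
  | kv :: t, s, w => if kv.1 = s then (kv.1, kv.2 ++ [w]) :: t else kv :: pvDmod t s w

def preprocess_build_word_sememe_cooccur (hownet_dict : List (String × List String)) : (List (String × List String)) × List String :=
  -- first pass: sememe_all, unique sememes in first-appearance order
  let sememe_all := hownet_dict.foldl (fun a p => p.2.foldl (fun a s => if s ∈ a then a else a ++ [s]) a) []
  -- dict comprehension {item: [] for item in sememe_all}
  let init := sememe_all.map (fun s => (s, ([] : List String)))
  -- second pass: append each word to its sememes' lists
  let d := hownet_dict.foldl (fun d p => p.2.foldl (fun d s => pvDmod d s p.1) d) init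
  (d, sememe_all)

-- ===== PORT B =====
def preprocess_build_word_sememe_cooccur_alt (hownet_dict : List (String × List String)) : (List (String × List String)) × List String :=
  -- list(dict.fromkeys(s for ss in values for s in ss))
  let sememe_all := PySem.List.dedup (hownet_dict.flatMap (fun p => p.2))
  -- {s: [w for w, ss in items for t in ss if t == s] for s in sememe_all}
  let d := sememe_all.map (fun s =>
    (s, hownet_dict.flatMap (fun p => ((p.2.filter (fun t => t == s)).map (fun _ => p.1)))))
  (d, sememe_all)

-- ===== PRECONDITION & SPEC =====
def Spec_preprocess_build_word_sememe_cooccur (hownet_dict : List (String × List String)) (out : (List (String × List String)) × List String) : Prop := out = preprocess_build_word_sememe_cooccur_alt hownet_dict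
instance (hownet_dict : List (String × List String)) (out : (List (String × List String)) × List String) : Decidable (Spec_preprocess_build_word_sememe_cooccur hownet_dict out) := by unfold Spec_preprocess_build_word_sememe_cooccur; infer_instance

-- ===== CLAIM (what is proved, stated in full; the proofs are below) =====
def Claim_equal_preprocess_build_word_sememe_cooccur : Prop := ∀ (hownet_dict : List (String × List String)), Dom_preprocess_build_word_sememe_cooccur hownet_dict → Spec_preprocess_build_word_sememe_cooccur hownet_dict (preprocess_build_word_sememe_cooccur hownet_dict)

-- ===== LEMMAS AND PROOFS =====

-- both of A's nested loops iterate the flattened (word, sememe) pair stream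
theorem pv_nest {β : Type} (l : List (String × List String)) (g : β → String → String → β) (init : β) :
    l.foldl (fun a p => p.2.foldl (fun a s => g a p.1 s) a) init
      = (l.flatMap (fun p => p.2.map (fun s => (p.1, s)))).foldl (fun a q => g a q.1 q.2) init := by
  induction l generalizing init with
  | nil => simp
  | cons p t ih => simp [List.foldl_append, List.foldl_map, ih]

-- the words gathered for sememe s from the flattened pair stream
def pvGather (s : String) (ps : List (String × String)) : List String :=
  ps.filterMap (fun q => if q.2 = s then some q.1 else none)

def pvAfold (d : List (String × List String)) (ps : List (String × String)) : List (String × List String) :=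
  ps.foldl (fun d q => pvDmod d q.2 q.1) d

theorem pvDmod_keys (d : List (String × List String)) (s w : String) :
    (pvDmod d s w).map Prod.fst = d.map Prod.fst := by
  induction d with
  | nil => rfl
  | cons kv t ih => by_cases h : kv.1 = s <;> simp [pvDmod, h, ih]

theorem pvDmod_eq_map (d : List (String × List String)) (s w : String)
    (hnd : (d.map Prod.fst).Nodup) :
    pvDmod d s w = d.map (fun kv => if kv.1 = s then (kv.1, kv.2 ++ [w]) else kv) := by
  induction d with
  | nil => rfl
  | cons kv t ih =>
    simp only [List.map_cons, List.nodup_cons] at hnd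
    by_cases h : kv.1 = s
    · have ht : s ∉ t.map Prod.fst := h ▸ hnd.1
      have : t.map (fun kv => if kv.1 = s then (kv.1, kv.2 ++ [w]) else kv) = t := by
        apply List.map_congr_left ?_ |>.trans (List.map_id t)
        intro a ha
        have : a.1 ≠ s := fun hs => ht (hs ▸ List.mem_map_of_mem ha)
        simp [this]
      simp [pvDmod, h, this]
    · simp [pvDmod, h, ih hnd.2]

theorem pvAfold_eq_gather (ps : List (String × String)) : ∀ d : List (String × List String),
    (d.map Prod.fst).Nodup →
    pvAfold d ps = d.map (fun kv => (kv.1, kv.2 ++ pvGather kv.1 ps)) := by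
  induction ps with
  | nil =>
    intro d _
    simp [pvAfold, pvGather]
  | cons q t ih =>
    intro d hnd
    have hstep : pvAfold d (q :: t) = pvAfold (pvDmod d q.2 q.1) t := by
      simp [pvAfold]
    have hnd' : ((pvDmod d q.2 q.1).map Prod.fst).Nodup := by rw [pvDmod_keys]; exact hnd
    rw [hstep, ih _ hnd', pvDmod_eq_map _ _ _ hnd, List.map_map]
    apply List.map_congr_left
    rintro ⟨k, v⟩ _
    by_cases h : k = q.2
    · subst h
      simp [Function.comp_apply, pvGather]
    · have h2 : ¬ q.2 = k := fun hs => h hs.symm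
      simp [Function.comp_apply, pvGather, h, h2]

-- the inner gather comprehension, per word
theorem pv_gather_inner (s w : String) (l : List String) :
    l.filterMap (fun t => if t = s then some w else none)
      = (l.filter (fun t => t == s)).map (fun _ => w) := by
  induction l with
  | nil => rfl
  | cons x t ih => by_cases h : x = s <;> simp [h, ih]

-- pvGather over the flattened pair stream equals B's per-sememe comprehension
theorem pv_gather_flat (s : String) (l : List (String × List String)) :
    pvGather s (l.flatMap (fun p => p.2.map (fun t => (p.1, t))))
      = l.flatMap (fun p => ((p.2.filter (fun t => t == s)).map (fun _ => p.1))) := by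
  induction l with
  | nil => rfl
  | cons p t ih =>
    simp only [pvGather, List.flatMap_cons, List.filterMap_append, List.filterMap_map] at *
    rw [ih]
    congr 1
    simpa [Function.comp_def] using pv_gather_inner s p.1 p.2

-- ===== VERDICT (by name: the statement is the Claim_ definition above) =====
theorem preprocess_build_word_sememe_cooccur_spec : Claim_equal_preprocess_build_word_sememe_cooccur := by
  intro h _
  unfold Spec_preprocess_build_word_sememe_cooccur
  unfold preprocess_build_word_sememe_cooccur preprocess_build_word_sememe_cooccur_alt
  simp only
  rw [pv_nest h (fun a w s => if s ∈ a then a else a ++ [s]) [],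
      pv_nest h (fun d w s => pvDmod d s w)]
  set ps := h.flatMap (fun p => p.2.map (fun s => (p.1, s))) with hps
  -- A's first pass is PySem.List.dedup of the flattened sememe stream
  have hsnd : ps.map Prod.snd = h.flatMap (fun p => p.2) := by
    simp [hps, List.map_flatMap, List.map_map]
  have hall : ps.foldl (fun a q => if q.2 ∈ a then a else a ++ [q.2]) []
      = PySem.List.dedup (h.flatMap (fun p => p.2)) := by
    rw [PySem.List.dedup_eq_ofList, ← hsnd, PySem.Set.ofList_eq_foldl, List.foldl_map]
    simp only [PySem.Set.add_eq_ite]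
  rw [hall]
  set sa := PySem.List.dedup (h.flatMap (fun p => p.2)) with hsa
  have hnd : ((sa.map (fun s => (s, ([] : List String)))).map Prod.fst).Nodup := by
    have hid : (sa.map (fun s => (s, ([] : List String)))).map Prod.fst = sa := by
      simp [List.map_map, Function.comp_def]
    rw [hid, hsa]
    exact PySem.List.nodup_dedup _
  have := pvAfold_eq_gather ps (sa.map (fun s => (s, ([] : List String)))) hnd
  unfold pvAfold at this
  rw [this, List.map_map]
  refine congrArg (fun x => (x, sa)) ?_
  apply List.map_congr_left
  intro s _
  simp only [Function.comp_apply, List.nil_append]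
  refine congrArg (fun x => (s, x)) ?_
  -- pvGather over the flattened stream = B's per-sememe flatMap comprehension
  rw [hps]
  exact pv_gather_flat s h
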